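-- pv_equiv track=rewrite | github.com/LennyGonz/LeetCode-Questions | Daily-Coding-Problem/problem-79.py | check
-- ===== SOURCE A (Python) =====
-- def check(lst):
--   count = 0
--   for i in range(len(lst) - 1):
--     if lst[i] > lst[i + 1]:
--       if count > 0:
--         return False
--       if i - 1 >= 0 and i + 2 < len(lst) and lst[i] > lst[i + 2] and lst[i + 1] < lst[i - 1]:
--         return False
--       count += 1
--   return True
-- ===== SOURCE B (Python) =====
-- def check(lst):
--     nums = list(lst)
--     changed = False
--     i = 0
--     while i + 1 < len(nums):
--         if nums[i] > nums[i + 1]: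
--             if changed:
--                 return False
--             if i == 0 or nums[i - 1] <= nums[i + 1]:
--                 nums[i] = nums[i + 1]
--             else:
--                 nums[i + 1] = nums[i]
--             changed = True
--         i += 1
--     return True
-- ===== Notes on version B (the rewrite author's own statement) =====
-- stated objective: alternative
-- what changed: B simulates the one allowed modification: it copies the list, greedily repairs the first descent in the copy in place (lowering the left element or raising the right one) and returns False on any descent of the mutated array thereafter, instead of A's violation counter with an inline four-term boundary predicate on the unmodified array.
import Mathlib
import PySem

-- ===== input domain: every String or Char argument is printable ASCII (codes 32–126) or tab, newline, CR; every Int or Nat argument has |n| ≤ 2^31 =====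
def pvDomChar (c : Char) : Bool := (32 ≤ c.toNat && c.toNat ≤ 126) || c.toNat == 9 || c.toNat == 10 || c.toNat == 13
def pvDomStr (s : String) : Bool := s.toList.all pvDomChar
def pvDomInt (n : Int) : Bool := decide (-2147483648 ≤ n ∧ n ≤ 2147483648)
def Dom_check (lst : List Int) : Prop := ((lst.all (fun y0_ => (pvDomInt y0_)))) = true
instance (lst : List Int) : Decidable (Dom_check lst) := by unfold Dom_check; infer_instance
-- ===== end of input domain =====

-- B simulates the one allowed modification on a copy of the list (greedy in-place repair of
-- the first descent, fail on any later descent of the mutated array) instead of A's counter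
-- with an inline four-term boundary predicate on the unmodified array. Same O(n) cost.

-- ===== PORT A =====
-- A's for-loop over range(len(lst)-1) with state `count`; early returns become Bool results
def checkLoop (lst : List Int) : List Nat → Int → Bool
  | [], _ => true
  | i :: rest, count =>
      if lst.getD i 0 > lst.getD (i + 1) 0 then        -- indices from range are in bounds, getD is exact
        if count > 0 then false
        else if (i : Int) - 1 ≥ 0 ∧ i + 2 < lst.length ∧
                lst.getD i 0 > lst.getD (i + 2) 0 ∧
                lst.getD (i + 1) 0 < lst.getD (i - 1) 0 then false
        else checkLoop lst rest (count + 1)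
      else checkLoop lst rest count

def check (lst : List Int) : Bool :=
  checkLoop lst (List.range (lst.length - 1)) 0

-- ===== PORT B =====
-- B's while-loop: `nums` is the mutated copy, `changed` the one-repair flag
def altLoop (nums : List Int) (i : Nat) (changed : Bool) : Bool :=
  if i + 1 < nums.length then
    if nums.getD i 0 > nums.getD (i + 1) 0 then
      if changed then false
      else if i = 0 ∨ nums.getD (i - 1) 0 ≤ nums.getD (i + 1) 0 then
        altLoop (nums.set i (nums.getD (i + 1) 0)) (i + 1) true
      else
        altLoop (nums.set (i + 1) (nums.getD i 0)) (i + 1) true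
    else altLoop nums (i + 1) changed
  else true
termination_by nums.length - i
decreasing_by all_goals (try simp [List.length_set]); omega

def check_alt (lst : List Int) : Bool := altLoop lst 0 false

-- ===== PRECONDITION & SPEC =====
def Spec_check (lst : List Int) (out : Bool) : Prop := out = check_alt lst
instance (lst : List Int) (out : Bool) : Decidable (Spec_check lst out) := by unfold Spec_check; infer_instance

-- ===== CLAIM (what is proved, stated in full; the proofs are below) =====
def Claim_equal_check : Prop := ∀ (lst : List Int), Dom_check lst → Spec_check lst (check lst)

-- ===== LEMMAS AND PROOFS =====

-- "no descent at any index ≥ i" of a list, as a Bool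
def noViol (nums : List Int) (i : Nat) : Bool :=
  decide (∀ j < nums.length - 1, i ≤ j → nums.getD j 0 ≤ nums.getD (j + 1) 0)

theorem getD_set_ne (l : List Int) (k j : Nat) (v : Int) (h : k ≠ j) :
    (l.set k v).getD j 0 = l.getD j 0 := by
  simp [List.getD_eq_getElem?_getD, List.getElem?_set_ne h]

theorem getD_set_self (l : List Int) (k : Nat) (v : Int) (h : k < l.length) :
    (l.set k v).getD k 0 = v := by
  simp [List.getD_eq_getElem?_getD, h]

theorem noViol_vacuous (nums : List Int) (i : Nat) (h : nums.length ≤ i + 1) :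
    noViol nums i = true := by
  rw [noViol, decide_eq_true_eq]; intro j hj hij; omega

theorem noViol_false_at (nums : List Int) (i : Nat) (h : i + 1 < nums.length)
    (hv : nums.getD i 0 > nums.getD (i + 1) 0) : noViol nums i = false := by
  rw [noViol, decide_eq_false_iff_not]
  intro hall; have := hall i (by omega) le_rfl; omega

theorem noViol_step (nums : List Int) (i : Nat)
    (hv : ¬ nums.getD i 0 > nums.getD (i + 1) 0) :
    noViol nums (i + 1) = noViol nums i := by
  simp only [noViol]; rw [decide_eq_decide]
  constructor
  · intro hall j hj hij
    by_cases hji : j = i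
    · subst hji; omega
    · exact hall j hj (by omega)
  · intro hall j hj hij; exact hall j hj (by omega)

-- B's loop after the repair just scans the mutated array for any descent
theorem altLoop_true_aux (k : Nat) : ∀ (nums : List Int) (i : Nat),
    nums.length - i ≤ k → altLoop nums i true = noViol nums i := by
  induction k with
  | zero =>
    intro nums i h
    rw [altLoop, if_neg (by omega)]
    exact (noViol_vacuous nums i (by omega)).symm
  | succ k ih =>
    intro nums i h
    rw [altLoop]
    by_cases h1 : i + 1 < nums.length
    · rw [if_pos h1]
      by_cases hv : nums.getD i 0 > nums.getD (i + 1) 0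
      · rw [if_pos hv, if_pos rfl]
        exact (noViol_false_at nums i h1 hv).symm
      · rw [if_neg hv, ih nums (i + 1) (by omega)]
        exact noViol_step nums i hv
    · rw [if_neg h1]
      exact (noViol_vacuous nums i (by omega)).symm

theorem altLoop_true (nums : List Int) (i : Nat) :
    altLoop nums i true = noViol nums i :=
  altLoop_true_aux (nums.length - i) nums i le_rfl

-- A's loop with count ≥ 1 scans the original array for any descent
theorem checkLoop_one (lst : List Int) (k : Nat) : ∀ (i : Nat) (c : Int), 0 < c →
    lst.length - 1 - i ≤ k →
    checkLoop lst (List.range' i (lst.length - 1 - i)) c = noViol lst i := by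
  induction k with
  | zero =>
    intro i c hc h
    have h0 : lst.length - 1 - i = 0 := by omega
    rw [h0]
    simp only [List.range', checkLoop]
    exact (noViol_vacuous lst i (by omega)).symm
  | succ k ih =>
    intro i c hc h
    by_cases hi : lst.length - 1 - i = 0
    · rw [hi]
      simp only [List.range', checkLoop]
      exact (noViol_vacuous lst i (by omega)).symm
    · obtain ⟨m, hm⟩ : ∃ m, lst.length - 1 - i = m + 1 := ⟨lst.length - 1 - i - 1, by omega⟩
      rw [hm, List.range'_succ]
      simp only [checkLoop]
      by_cases hv : lst.getD i 0 > lst.getD (i + 1) 0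
      · rw [if_pos hv, if_pos hc]
        exact (noViol_false_at lst i (by omega) hv).symm
      · rw [if_neg hv]
        have hm' : m = lst.length - 1 - (i + 1) := by omega
        rw [hm', ih (i + 1) c hc (by omega)]
        exact noViol_step lst i hv

-- the step at the unique repair point: A's boundary predicate vs B's mutated scan
theorem repair_step (lst : List Int) (i : Nat) (hlt : i + 1 < lst.length)
    (hv : lst.getD i 0 > lst.getD (i + 1) 0) :
    (if (i : Int) - 1 ≥ 0 ∧ i + 2 < lst.length ∧
        lst.getD i 0 > lst.getD (i + 2) 0 ∧ lst.getD (i + 1) 0 < lst.getD (i - 1) 0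
     then false else noViol lst (i + 1)) =
    (if i = 0 ∨ lst.getD (i - 1) 0 ≤ lst.getD (i + 1) 0
     then noViol (lst.set i (lst.getD (i + 1) 0)) (i + 1)
     else noViol (lst.set (i + 1) (lst.getD i 0)) (i + 1)) := by
  by_cases hbr : i = 0 ∨ lst.getD (i - 1) 0 ≤ lst.getD (i + 1) 0
  · -- lower the left element: A's boundary predicate is false, the tail is untouched
    rw [if_pos hbr, if_neg ?_]
    · simp only [noViol, List.length_set]
      rw [decide_eq_decide]
      constructor
      · intro hall j hj hij
        rw [getD_set_ne _ _ _ _ (by omega), getD_set_ne _ _ _ _ (by omega)]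
        exact hall j hj hij
      · intro hall j hj hij
        have := hall j hj hij
        rw [getD_set_ne _ _ _ _ (by omega), getD_set_ne _ _ _ _ (by omega)] at this
        exact this
    · rcases hbr with h0 | hle
      · subst h0; rintro ⟨h1, -⟩; omega
      · rintro ⟨-, -, -, h4⟩; omega
  · rw [if_neg hbr]
    push Not at hbr
    obtain ⟨hne, hgt⟩ := hbr
    by_cases hu : (i : Int) - 1 ≥ 0 ∧ i + 2 < lst.length ∧
        lst.getD i 0 > lst.getD (i + 2) 0 ∧ lst.getD (i + 1) 0 < lst.getD (i - 1) 0
    · -- unfixable: the raised right element still descends at i+1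
      rw [if_pos hu]
      obtain ⟨-, h2, h3, -⟩ := hu
      symm
      rw [noViol, decide_eq_false_iff_not]
      intro hall
      have := hall (i + 1) (by simp [List.length_set]; omega) le_rfl
      rw [getD_set_self _ _ _ (by omega), getD_set_ne _ _ _ _ (by omega),
        show i + 1 + 1 = i + 2 from rfl] at this
      omega
    · rw [if_neg hu]
      have hfix : i + 2 < lst.length → lst.getD i 0 ≤ lst.getD (i + 2) 0 := by
        intro h2
        by_contra hc
        exact hu ⟨by omega, h2, by omega, hgt⟩
      simp only [noViol, List.length_set]
      rw [decide_eq_decide]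
      constructor
      · intro hall j hj hij
        by_cases hji : j = i + 1
        · subst hji
          rw [getD_set_self _ _ _ (by omega), getD_set_ne _ _ _ _ (by omega),
            show i + 1 + 1 = i + 2 from rfl]
          exact hfix (by omega)
        · rw [getD_set_ne _ _ _ _ (by omega), getD_set_ne _ _ _ _ (by omega)]
          exact hall j hj hij
      · intro hall j hj hij
        by_cases hji : j = i + 1
        · subst hji
          have := hall (i + 1) hj le_rfl
          rw [getD_set_self _ _ _ (by omega), getD_set_ne _ _ _ _ (by omega),
            show i + 1 + 1 = i + 2 from rfl] at this
          rw [show i + 1 + 1 = i + 2 from rfl]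
          omega
        · have := hall j hj hij
          rw [getD_set_ne _ _ _ _ (by omega), getD_set_ne _ _ _ _ (by omega)] at this
          exact this

-- the two pre-repair scans move in lockstep
theorem main_lemma_aux (lst : List Int) (k : Nat) : ∀ i : Nat, lst.length - 1 - i ≤ k →
    checkLoop lst (List.range' i (lst.length - 1 - i)) 0 = altLoop lst i false := by
  induction k with
  | zero =>
    intro i h
    have h0 : lst.length - 1 - i = 0 := by omega
    rw [h0, altLoop, if_neg (by omega)]
    simp only [List.range', checkLoop]
  | succ k ih =>
    intro i h
    by_cases hi : lst.length - 1 - i = 0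
    · rw [hi, altLoop, if_neg (by omega)]
      simp only [List.range', checkLoop]
    · obtain ⟨m, hm⟩ : ∃ m, lst.length - 1 - i = m + 1 := ⟨lst.length - 1 - i - 1, by omega⟩
      have h1 : i + 1 < lst.length := by omega
      rw [hm, List.range'_succ, altLoop, if_pos h1]
      simp only [checkLoop]
      by_cases hv : lst.getD i 0 > lst.getD (i + 1) 0
      · rw [if_pos hv, if_pos hv]
        simp only [Bool.false_eq_true, if_false]
        rw [altLoop_true, altLoop_true]
        have hm' : m = lst.length - 1 - (i + 1) := by omega
        rw [hm', checkLoop_one lst (lst.length - 1 - (i + 1)) (i + 1) (0 + 1) (by omega) le_rfl]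
        exact repair_step lst i h1 hv
      · rw [if_neg hv, if_neg hv]
        have hm' : m = lst.length - 1 - (i + 1) := by omega
        rw [hm']
        exact ih (i + 1) (by omega)

theorem main_lemma (lst : List Int) (k i : Nat) (hk : lst.length - 1 - i ≤ k) :
    checkLoop lst (List.range' i (lst.length - 1 - i)) 0 = altLoop lst i false :=
  main_lemma_aux lst k i hk

-- ===== VERDICT =====
theorem check_spec : Claim_equal_check := by
  intro lst _
  unfold Spec_check check check_alt
  rw [List.range_eq_range']
  have h0 : lst.length - 1 = lst.length - 1 - 0 := by omega
  rw [h0]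
  exact main_lemma lst _ 0 le_rfl
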